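-- pv_equiv track=rewrite | github.com/haojiang2020/Number-Generator | number_generator_code_part.py | English_name_valid
-- ===== SOURCE A (Python) =====
-- def English_name_valid(in_list):
--     English_name_capital = ("A", "B", "C", "D", "E", "F", "G",
--                             "H", "I", "J", "K", "L", "M", "N",
--                             "O", "P", "Q", "R", "S", "T",
--                             "U", "V", "W", "X", "Y", "Z")
--     English_name_other = (" ", "-", "'")
--     out_bool = True
--     temp_len_0 = len(in_list[0])
--     temp_len_1 = len(in_list[1])
--     temp_len_2 = len(in_list[2])
--     if temp_len_0 < 1:
--         out_bool = (temp_len_1 < 1) & (temp_len_2 < 1)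
--     else:
--         if temp_len_0 == 1:
--             out_bool = in_list[0][0] in English_name_capital
--         else:
--             if in_list[0][0] in English_name_capital:
--                 for n in range(1, temp_len_0):
--                     temp_str_0 = in_list[0][n].upper()
--                     if ((not temp_str_0 in English_name_capital) &
--                         (not temp_str_0 in English_name_other)):
--                         out_bool = False
--                         break
--             else:
--                 out_bool = False
--         if out_bool:
--             if temp_len_1 > 0:
--                 if temp_len_1 == 1:
--                     out_bool = in_list[1][0] in English_name_capital
--                 else:
--                     if in_list[1][0] in English_name_capital:
--                         for n in range(1, temp_len_1):
--                             temp_str_0 = in_list[1][n].upper()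
--                             if ((not temp_str_0 in English_name_capital) &
--                                 (not temp_str_0 in English_name_other)):
--                                 out_bool = False
--                                 break
--                     else:
--                         out_bool = False
--         if out_bool:
--             if temp_len_2 > 0:
--                 if temp_len_2 == 1:
--                     out_bool = in_list[2][0] in English_name_capital
--                 else:
--                     if in_list[2][0] in English_name_capital:
--                         for n in range(1, temp_len_2):
--                             temp_str_0 = in_list[2][n].upper()
--                             if ((not temp_str_0 in English_name_capital) &
--                                 (not temp_str_0 in English_name_other)):
--                                 out_bool = False
--                                 break
--                     else:
--                         out_bool = False
--     return out_bool
-- ===== SOURCE B (Python) =====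
-- def English_name_valid(in_list):
--     first, middle, last = in_list[0], in_list[1], in_list[2]
--     if first == "":
--         return middle == "" and last == ""
--
--     def ok(s):
--         # bulk check: head must be an uppercase letter; the tail, with the
--         # separators " -'" deleted, must be empty or purely alphabetic
--         if s == "":
--             return True
--         if not (s[0].isalpha() and s[0].isupper()):
--             return False
--         stripped = s[1:].replace(" ", "").replace("-", "").replace("'", "")
--         return stripped == "" or stripped.isalpha()
--
--     return ok(first) and ok(middle) and ok(last)
-- ===== Notes on version B (the rewrite author's own statement) =====
-- stated objective: simpler
-- what changed: Replaces A's three unrolled per-character membership loops over explicit capital/separator tuples with bulk string operations: delete the separators " -'" via str.replace and test the remainder with a single str.isalpha (plus str.isupper on the head) per name part.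
import Mathlib
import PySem

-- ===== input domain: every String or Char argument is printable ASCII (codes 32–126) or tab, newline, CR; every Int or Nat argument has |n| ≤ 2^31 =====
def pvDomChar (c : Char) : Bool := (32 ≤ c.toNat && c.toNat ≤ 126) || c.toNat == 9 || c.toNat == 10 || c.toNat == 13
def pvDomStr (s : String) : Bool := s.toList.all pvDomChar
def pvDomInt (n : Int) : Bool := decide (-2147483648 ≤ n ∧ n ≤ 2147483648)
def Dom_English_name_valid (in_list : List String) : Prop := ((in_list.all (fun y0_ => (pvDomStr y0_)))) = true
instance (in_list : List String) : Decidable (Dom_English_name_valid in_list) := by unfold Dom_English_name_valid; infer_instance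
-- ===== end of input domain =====

-- B drops A's per-character loops and alphabet tuples: it bulk-deletes the separators " -'" with str.replace and then applies one str.isalpha/str.isupper test per name part; objective: simpler.


-- ===== PORT A =====
def capsA : List Char := ['A','B','C','D','E','F','G','H','I','J','K','L','M','N','O','P','Q','R','S','T','U','V','W','X','Y','Z']
def othersA : List Char := [' ', '-', '\'']

-- the 'for n in range(1, len)' scan with break, as structural recursion over the remaining chars
def loopA : List Char → Bool
  | [] => true
  | c :: rest =>
      let t := c.toUpper
      if (!capsA.contains t) && (!othersA.contains t) then false else loopA rest

def English_name_valid (in_list : List String) : Bool :=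
  let s0 := ((PySem.List.pyGet? in_list 0).getD "").toList
  let s1 := ((PySem.List.pyGet? in_list 1).getD "").toList
  let s2 := ((PySem.List.pyGet? in_list 2).getD "").toList
  let L0 := s0.length
  let L1 := s1.length
  let L2 := s2.length
  if L0 < 1 then
    decide (L1 < 1) && decide (L2 < 1)
  else
    let ob1 :=
      if L0 = 1 then capsA.contains (s0.headD ' ')
      else if capsA.contains (s0.headD ' ') then loopA (s0.drop 1) else false
    let ob2 :=
      if ob1 then
        if L1 > 0 then
          if L1 = 1 then capsA.contains (s1.headD ' ')
          else if capsA.contains (s1.headD ' ') then loopA (s1.drop 1) else false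
        else ob1
      else ob1
    let ob3 :=
      if ob2 then
        if L2 > 0 then
          if L2 = 1 then capsA.contains (s2.headD ' ')
          else if capsA.contains (s2.headD ' ') then loopA (s2.drop 1) else false
        else ob2
      else ob2
    ob3

-- ===== PORT B =====
-- Source B's ok(): head an uppercase letter, tail with the separators deleted (three str.replace calls) empty or purely alphabetic
def okB (s : String) : Bool :=
  match s.toList with
  | [] => true
  | c :: rest =>
      if !(PySem.Chars.isalpha c && PySem.Chars.isupper c) then false
      else
        let stripped := PySem.Chars.replace (PySem.Chars.replace (PySem.Chars.replace rest [' '] []) ['-'] []) ['\''] []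
        decide (stripped = []) || PySem.Chars.strIsalpha stripped

def English_name_valid_alt (in_list : List String) : Bool :=
  let first := (PySem.List.pyGet? in_list 0).getD ""
  let middle := (PySem.List.pyGet? in_list 1).getD ""
  let last := (PySem.List.pyGet? in_list 2).getD ""
  if first.toList = [] then decide (middle.toList = []) && decide (last.toList = [])
  else okB first && okB middle && okB last

-- ===== PRECONDITION & SPEC =====
-- Pre_ excludes only lists with fewer than 3 elements, on which A raises IndexError.
def Pre_English_name_valid (in_list : List String) : Prop := 3 ≤ in_list.length
instance (in_list : List String) : Decidable (Pre_English_name_valid in_list) := by unfold Pre_English_name_valid; infer_instance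
def pvWitness_English_name_valid : List String := ["Ab", "Mc'Donald", ""]

def Spec_English_name_valid (in_list : List String) (out : Bool) : Prop := out = English_name_valid_alt in_list
instance (in_list : List String) (out : Bool) : Decidable (Spec_English_name_valid in_list out) := by unfold Spec_English_name_valid; infer_instance

-- ===== CLAIM (what is proved, stated in full; the proofs are below) =====
def Claim_equal_English_name_valid : Prop := ∀ (in_list : List String), Dom_English_name_valid in_list → Pre_English_name_valid in_list → Spec_English_name_valid in_list (English_name_valid in_list)

-- ===== LEMMAS AND PROOFS =====
-- proof-side reformulations of the two bodies (definitionally equal to the ports)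
def blkA (s : List Char) : Bool :=
  if s.length = 1 then capsA.contains (s.headD ' ')
  else if capsA.contains (s.headD ' ') then loopA (s.drop 1) else false

def chainA (b : Bool) (s : List Char) : Bool :=
  if b then (if s.length > 0 then blkA s else b) else b

def abody (s0 s1 s2 : List Char) : Bool :=
  if s0.length < 1 then decide (s1.length < 1) && decide (s2.length < 1)
  else chainA (chainA (blkA s0) s1) s2

def okBbody : List Char → Bool
  | [] => true
  | c :: rest =>
      if !(PySem.Chars.isalpha c && PySem.Chars.isupper c) then false
      else
        let stripped := PySem.Chars.replace (PySem.Chars.replace (PySem.Chars.replace rest [' '] []) ['-'] []) ['\''] []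
        decide (stripped = []) || PySem.Chars.strIsalpha stripped

def bbody (s0 s1 s2 : List Char) : Bool :=
  if s0 = [] then decide (s1 = []) && decide (s2 = []) else okBbody s0 && okBbody s1 && okBbody s2

lemma A_as_abody (in_list : List String) :
    English_name_valid in_list
      = abody (((PySem.List.pyGet? in_list 0).getD "").toList)
              (((PySem.List.pyGet? in_list 1).getD "").toList)
              (((PySem.List.pyGet? in_list 2).getD "").toList) := rfl

lemma B_as_bbody (in_list : List String) :
    English_name_valid_alt in_list
      = bbody (((PySem.List.pyGet? in_list 0).getD "").toList)
              (((PySem.List.pyGet? in_list 1).getD "").toList)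
              (((PySem.List.pyGet? in_list 2).getD "").toList) := rfl

-- replace with a single-char pattern and empty replacement is a filter
lemma go_single (c : Char) (l : List Char) :
    ∀ (fuel : Nat) (acc : List Char), l.length ≤ fuel →
      PySem.Chars.replace.go [c] [] fuel l acc = acc.reverse ++ l.filter (fun d => !(d == c)) := by
  induction l with
  | nil =>
      intro fuel acc _
      cases fuel <;> simp [PySem.Chars.replace.go]
  | cons d t ih =>
      intro fuel acc hlen
      cases fuel with
      | zero => simp at hlen
      | succ f =>
        have ht : t.length ≤ f := by simpa using hlen
        by_cases h : d = c
        · subst h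
          simp [PySem.Chars.replace.go, List.isPrefixOf, ih f acc ht]
        · have : ([c].isPrefixOf (d :: t)) = false := by
            simp [List.isPrefixOf]; exact fun hdc => absurd hdc.symm h
          simp [PySem.Chars.replace.go, this, ih f (d :: acc) ht, List.filter_cons,
            show (d == c) = false by simp [h]]

lemma replace_single (c : Char) (l : List Char) :
    PySem.Chars.replace l [c] [] = l.filter (fun d => !(d == c)) := by
  simpa using go_single c l l.length [] le_rfl

lemma filter_all (l : List Char) (p q : Char → Bool) :
    (l.filter p).all q = l.all (fun x => !p x || q x) := by
  induction l with
  | nil => rfl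
  | cons a t ih => by_cases h : p a <;> simp [h, ih]

lemma empty_or_isalpha (l : List Char) :
    (decide (l = []) || PySem.Chars.strIsalpha l) = l.all PySem.Chars.isalpha := by
  cases l <;> simp [PySem.Chars.strIsalpha]

-- the old per-char loop as an 'all'
lemma loopA_eq_all (l : List Char) :
    loopA l = l.all (fun ch => capsA.contains ch.toUpper || othersA.contains ch.toUpper) := by
  induction l with
  | nil => rfl
  | cons c rest ih =>
      simp only [loopA, List.all_cons, ih]
      cases h1 : capsA.contains c.toUpper <;> cases h2 : othersA.contains c.toUpper <;> simp [h1, h2]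

-- pointwise character facts, decided over the 127 ASCII codes the domain admits
set_option maxRecDepth 40000 in
lemma head_char_range : ∀ n ∈ List.range 127,
    capsA.contains (Char.ofNat n) = (PySem.Chars.isalpha (Char.ofNat n) && PySem.Chars.isupper (Char.ofNat n)) := by
  decide

set_option maxRecDepth 40000 in
lemma tail_char_range : ∀ n ∈ List.range 127,
    (capsA.contains (Char.ofNat n).toUpper || othersA.contains (Char.ofNat n).toUpper)
      = (!((!((Char.ofNat n) == ' ')) && (!((Char.ofNat n) == '-')) && (!((Char.ofNat n) == '\'')))
          || PySem.Chars.isalpha (Char.ofNat n)) := by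
  decide

lemma dom_lt (c : Char) (h : pvDomChar c = true) : c.toNat < 127 := by
  simp only [pvDomChar, Bool.or_eq_true, Bool.and_eq_true, decide_eq_true_eq, beq_iff_eq] at h
  rcases h with ((h | h) | h) | h
  · omega
  · omega
  · omega
  · omega

lemma head_char (c : Char) (h : pvDomChar c = true) :
    capsA.contains c = (PySem.Chars.isalpha c && PySem.Chars.isupper c) := by
  have := head_char_range c.toNat (by simpa using dom_lt c h)
  simpa [Char.ofNat_toNat] using this

lemma tail_char (c : Char) (h : pvDomChar c = true) :
    (capsA.contains c.toUpper || othersA.contains c.toUpper)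
      = (!((!(c == ' ')) && (!(c == '-')) && (!(c == '\''))) || PySem.Chars.isalpha c) := by
  have := tail_char_range c.toNat (by simpa using dom_lt c h)
  simpa [Char.ofNat_toNat] using this

lemma all_congr_of_mem {l : List Char} {f g : Char → Bool}
    (h : ∀ x ∈ l, f x = g x) : l.all f = l.all g := by
  induction l with
  | nil => rfl
  | cons a t ih =>
      simp only [List.all_cons, h a (by simp), ih (fun x hx => h x (by simp [hx]))]

-- A's per-string branch block equals B's ok, for a nonempty all-domain string
lemma blk_eq (c : Char) (rest : List Char) (hdom : ∀ x ∈ c :: rest, pvDomChar x = true) :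
    blkA (c :: rest) = okBbody (c :: rest) := by
  have hc := head_char c (hdom c (by simp))
  have hrest : ∀ x ∈ rest, pvDomChar x = true := fun x hx => hdom x (by simp [hx])
  have tailB :
      (decide ((PySem.Chars.replace (PySem.Chars.replace (PySem.Chars.replace rest [' '] []) ['-'] []) ['\''] []) = [])
        || PySem.Chars.strIsalpha (PySem.Chars.replace (PySem.Chars.replace (PySem.Chars.replace rest [' '] []) ['-'] []) ['\''] []))
        = loopA rest := by
    rw [empty_or_isalpha, replace_single, replace_single, replace_single, List.filter_filter,
      List.filter_filter, filter_all, loopA_eq_all]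
    refine (all_congr_of_mem ?_).symm
    intro x hx
    rw [tail_char x (hrest x hx)]
    cases h1 : (x == ' ') <;> cases h2 : (x == '-') <;> cases h3 : (x == '\'') <;> simp [h1, h2, h3]
  cases rest with
  | nil =>
      have hstr : okBbody [c] = (PySem.Chars.isalpha c && PySem.Chars.isupper c) := by
        cases h : PySem.Chars.isalpha c && PySem.Chars.isupper c <;>
          simp [okBbody, h, PySem.Chars.replace, PySem.Chars.replace.go]
      rw [show blkA [c] = capsA.contains c from by simp [blkA], hstr, hc]
  | cons d t =>
      simp only [blkA, okBbody, List.length_cons, List.headD_cons, List.drop_succ_cons,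
        List.drop_zero, hc]
      rw [if_neg (by simp)]
      cases h : PySem.Chars.isalpha c && PySem.Chars.isupper c
      · simp [h]
      · simp only [h, Bool.not_true, Bool.false_eq_true, if_false, if_true]
        exact tailB.symm

-- the 'if out_bool:' gating of A equals B's && chaining
lemma chain_eq (b : Bool) (s : List Char) (hdom : ∀ x ∈ s, pvDomChar x = true) :
    chainA b s = (b && okBbody s) := by
  cases b with
  | false => simp [chainA]
  | true =>
      cases s with
      | nil => simp [chainA, okBbody]
      | cons c r => simpa [chainA] using blk_eq c r hdom

lemma core (s0 s1 s2 : List Char)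
    (h0 : ∀ x ∈ s0, pvDomChar x = true) (h1 : ∀ x ∈ s1, pvDomChar x = true)
    (h2 : ∀ x ∈ s2, pvDomChar x = true) : abody s0 s1 s2 = bbody s0 s1 s2 := by
  unfold abody bbody
  cases s0 with
  | nil => simp [List.length_eq_zero_iff]
  | cons c0 r0 =>
      rw [if_neg (by simp), if_neg (by simp : ¬(c0 :: r0 = [])),
        chain_eq _ _ h1, chain_eq _ _ h2, blk_eq c0 r0 h0, Bool.and_assoc]

lemma dom_elt (in_list : List String) (hd : Dom_English_name_valid in_list) (i : Int) :
    ∀ x ∈ ((PySem.List.pyGet? in_list i).getD "").toList, pvDomChar x = true := by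
  intro x hx
  unfold Dom_English_name_valid at hd
  rw [List.all_eq_true] at hd
  cases h : PySem.List.pyGet? in_list i with
  | none => simp [h] at hx
  | some s =>
      have hmem : s ∈ in_list := by
        unfold PySem.List.pyGet? at h
        cases hk : PySem.List.pyIdx? in_list.length i with
        | none => simp [hk] at h
        | some k => rw [hk] at h; exact List.mem_of_getElem? (by simpa using h)
      have := hd s hmem
      simp only [pvDomStr, List.all_eq_true] at this
      exact this x (by simpa [h] using hx)

-- ===== VERDICT (by name: the statement is the Claim_ definition above) =====
theorem English_name_valid_spec : Claim_equal_English_name_valid := by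
  intro in_list hdom _
  unfold Spec_English_name_valid
  rw [A_as_abody, B_as_bbody]
  exact core _ _ _ (dom_elt _ hdom 0) (dom_elt _ hdom 1) (dom_elt _ hdom 2)
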